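-- pv_equiv track=rewrite | github.com/LumiiAI/lumii-ai-tutor_-2 | app19.py | is_appropriate_followup_time
-- ===== SOURCE A (Python) =====
-- from typing import Final, List, Pattern, Tuple, Dict, Optional, Iterable, Any
-- from typing import List, Optional
--
-- def is_appropriate_followup_time(topic: str, messages: List[Dict[str, Any]]) -> bool:
--     """True if it's appropriate to follow up on a topic.
--
--     Behavior preserved:
--       - Find the last user mention of `topic` (substring match, case-insensitive).
--       - Count messages since that mention; divide by 2 to estimate exchanges.
--       - Follow up only if at least 10 exchanges have passed.
--     """
--     if not topic or not isinstance(messages, list):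
--         return False
--
--     topic_l = topic.lower()
--     last_mention_index = -1
--
--     # Search backward for last user mention of the topic
--     for i in range(len(messages) - 1, -1, -1):
--         msg = messages[i] or {}
--         if msg.get("role") == "user" and topic_l in str(msg.get("content", "")).lower():
--             last_mention_index = i
--             break
--
--     if last_mention_index == -1:
--         return False  # Topic never mentioned
--
--     # Exchanges since last mention (same calculation as original)
--     messages_since = len(messages) - last_mention_index
--     exchanges_since = messages_since // 2
--     return exchanges_since >= 10
-- ===== SOURCE B (Python) =====
-- def is_appropriate_followup_time(topic, messages):
--     """No index arithmetic: the threshold `(len - last_mention)//2 >= 10` holds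
--     exactly when the last user mention lies before the final 19 messages, so
--     split the list there and check the two regions directly."""
--     if not topic or not isinstance(messages, list):
--         return False
--     topic_l = topic.lower()
--
--     def mentions(msg):
--         msg = msg or {}
--         return msg.get("role") == "user" and topic_l in str(msg.get("content", "")).lower()
--
--     cut = max(len(messages) - 19, 0)
--     # follow up iff no mention in the recent window and some mention before it
--     return not any(mentions(m) for m in messages[cut:]) and any(mentions(m) for m in messages[:cut])
-- ===== Notes on version B (the rewrite author's own statement) =====
-- stated objective: alternative
-- what changed: B eliminates the last-mention index and the exchanges //2 arithmetic entirely: since (len-i)//2>=10 iff the last user mention i lies before the final 19 messages, B splits the list at len-19 and returns 'no mention in the recent window and some mention before it'.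
import Mathlib
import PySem

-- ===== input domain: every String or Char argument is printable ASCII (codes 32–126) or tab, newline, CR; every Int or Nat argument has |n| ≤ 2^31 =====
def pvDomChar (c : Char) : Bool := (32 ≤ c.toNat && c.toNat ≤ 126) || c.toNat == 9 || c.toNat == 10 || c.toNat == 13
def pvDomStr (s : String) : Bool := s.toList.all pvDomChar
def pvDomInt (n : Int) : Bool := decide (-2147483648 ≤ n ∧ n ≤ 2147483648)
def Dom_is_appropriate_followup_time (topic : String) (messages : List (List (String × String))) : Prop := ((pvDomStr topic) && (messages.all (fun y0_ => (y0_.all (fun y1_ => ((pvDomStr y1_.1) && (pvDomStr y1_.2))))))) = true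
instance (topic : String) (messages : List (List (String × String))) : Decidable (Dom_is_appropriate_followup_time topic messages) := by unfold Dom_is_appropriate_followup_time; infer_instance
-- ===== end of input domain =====

-- B drops the last-mention index and the //2 arithmetic entirely: it splits the
-- list before the last 19 messages and checks "no mention recently, some mention
-- before" (objective: alternative; same result, same cost).

-- ===== PORT A =====
-- the shared per-message test: `msg = msg or {}` then
-- `msg.get("role") == "user" and topic_l in str(msg.get("content","")).lower()`
-- (this exact line occurs verbatim in both Pythons, as `mentions` in B)
def pvMsgMatches (topic_l : String) (msg0 : List (String × String)) : Bool :=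
  let msg := if msg0 = [] then ([] : List (String × String)) else msg0
  (msg.lookup "role" == some "user") &&
    PySem.Str.isIn topic_l (PySem.Str.lower ((msg.lookup "content").getD ""))

-- A's backward loop over range(len(messages)-1, -1, -1) with break
def pvLoopA (topic_l : String) (messages : List (List (String × String))) : List Int → Int
  | [] => -1
  | i :: rest =>
      let msg := (PySem.List.pyGet? messages i).getD []
      if pvMsgMatches topic_l msg then i else pvLoopA topic_l messages rest

def is_appropriate_followup_time (topic : String) (messages : List (List (String × String))) : Bool :=
  if topic = "" then false
  else
    let topic_l := PySem.Str.lower topic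
    let last_mention_index := pvLoopA topic_l messages
        (PySem.List.pyRange (PySem.List.len messages - 1) (-1) (-1))
    if last_mention_index = -1 then false
    else
      let messages_since := PySem.List.len messages - last_mention_index
      let exchanges_since := PySem.Int.floordiv messages_since 2
      decide (exchanges_since ≥ 10)

-- ===== PORT B =====
def is_appropriate_followup_time_alt (topic : String) (messages : List (List (String × String))) : Bool :=
  if topic = "" then false
  else
    let topic_l := PySem.Str.lower topic
    let cut := max (PySem.List.len messages - 19) 0
    !(PySem.List.slice messages (some cut) none).any (pvMsgMatches topic_l) &&
      (PySem.List.slice messages none (some cut)).any (pvMsgMatches topic_l)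

-- ===== PRECONDITION & SPEC =====
def Spec_is_appropriate_followup_time (topic : String) (messages : List (List (String × String))) (out : Bool) : Prop := out = is_appropriate_followup_time_alt topic messages
instance (topic : String) (messages : List (List (String × String))) (out : Bool) : Decidable (Spec_is_appropriate_followup_time topic messages out) := by unfold Spec_is_appropriate_followup_time; infer_instance

-- ===== CLAIM (what is proved, stated in full; the proofs are below) =====
def Claim_equal_is_appropriate_followup_time : Prop := ∀ (topic : String) (messages : List (List (String × String))), Dom_is_appropriate_followup_time topic messages → Spec_is_appropriate_followup_time topic messages (is_appropriate_followup_time topic messages)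

-- ===== LEMMAS AND PROOFS =====

-- --- bring A's backward loop into "last match index" foldl form ---

def pvRevFind (q : Int × List (String × String) → Bool) :
    List (Int × List (String × String)) → Int → Int
  | [], a => a
  | p :: r, a => if q p then p.1 else pvRevFind q r a

theorem pvRevFind_append (q : Int × List (String × String) → Bool)
    (l : List (Int × List (String × String))) (p : Int × List (String × String)) (a : Int) :
    pvRevFind q (l ++ [p]) a = pvRevFind q l (if q p then p.1 else a) := by
  induction l with
  | nil => simp [pvRevFind]
  | cons x xs ih => simp [pvRevFind, ih]

theorem pvFoldl_eq_revFind (q : Int × List (String × String) → Bool)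
    (ps : List (Int × List (String × String))) (a : Int) :
    ps.foldl (fun acc p => if q p then p.1 else acc) a = pvRevFind q ps.reverse a := by
  induction ps generalizing a with
  | nil => simp [pvRevFind]
  | cons x xs ih => simp [List.foldl, ih, pvRevFind_append]

theorem pvLoopA_eq_revFind (tl : String) (ms : List (List (String × String))) (l : List Int) :
    pvLoopA tl ms l =
      pvRevFind (fun p => pvMsgMatches tl p.2)
        (l.map (fun j => (j, (PySem.List.pyGet? ms j).getD []))) (-1) := by
  induction l with
  | nil => rfl
  | cons i rest ih => simp [pvLoopA, pvRevFind, ih]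

theorem pvLoopA_eq_foldl (tl : String) (ms : List (List (String × String))) :
    pvLoopA tl ms (PySem.List.pyRange (PySem.List.len ms - 1) (-1) (-1)) =
      (PySem.List.enumerate ms 0).foldl
        (fun acc p => if pvMsgMatches tl p.2 then p.1 else acc) (-1) := by
  rw [pvFoldl_eq_revFind, pvLoopA_eq_revFind,
    PySem.List.enumerate_eq_map_pyRange (d := ([] : List (String × String))),
    ← List.map_reverse]
  have h : PySem.List.pyRange (PySem.List.len ms - 1) (-1) (-1)
      = (PySem.List.pyRange 0 (PySem.List.len ms) 1).reverse := by
    rw [PySem.List.pyRange_neg_one_eq_reverse]; norm_num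
  rw [h]
  simp [PySem.List.pyGetD]

-- --- properties of the "last match index" foldl ---

theorem pvFold_no (q : List (String × String) → Bool) (ys : List (List (String × String)))
    (k a : Int) (h : ∀ y ∈ ys, ¬ q y = true) :
    (PySem.List.enumerate ys k).foldl (fun acc p => if q p.2 then p.1 else acc) a = a := by
  induction ys generalizing k a with
  | nil => rfl
  | cons y ys ih =>
      have hy : ¬ q y = true := h y (by simp)
      simp [PySem.List.enumerate_cons, hy]
      exact ih (k + 1) a (fun z hz => h z (by simp [hz]))

theorem pvFold_range (q : List (String × String) → Bool) (ys : List (List (String × String)))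
    (k a : Int) :
    (PySem.List.enumerate ys k).foldl (fun acc p => if q p.2 then p.1 else acc) a = a ∨
      (k ≤ (PySem.List.enumerate ys k).foldl (fun acc p => if q p.2 then p.1 else acc) a ∧
       (PySem.List.enumerate ys k).foldl (fun acc p => if q p.2 then p.1 else acc) a
         < k + ys.length) := by
  induction ys generalizing k a with
  | nil => left; rfl
  | cons y ys ih =>
      simp only [PySem.List.enumerate_cons, List.foldl, List.length_cons]
      by_cases hy : q y = true
      · simp only [hy, if_pos]
        rcases ih (k + 1) k with h | h
        · right; rw [h]; constructor <;> omega
        · right; push_cast; constructor <;> omega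
      · simp only [hy, if_neg, Bool.not_eq_true]
        rcases ih (k + 1) a with h | h
        · left; simpa using h
        · right; push_cast at h ⊢; constructor <;> omega

theorem pvFold_yes (q : List (String × String) → Bool) (ys : List (List (String × String)))
    (k a : Int) (h : ∃ y ∈ ys, q y = true) :
    k ≤ (PySem.List.enumerate ys k).foldl (fun acc p => if q p.2 then p.1 else acc) a ∧
      (PySem.List.enumerate ys k).foldl (fun acc p => if q p.2 then p.1 else acc) a
        < k + ys.length := by
  induction ys generalizing k a with
  | nil => simp at h
  | cons y ys ih =>
      simp only [PySem.List.enumerate_cons, List.foldl, List.length_cons]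
      by_cases hy : q y = true
      · simp only [hy, if_pos]
        rcases pvFold_range q ys (k + 1) k with hr | hr
        · rw [hr]; constructor <;> [omega; push_cast] ; omega
        · push_cast at hr ⊢; constructor <;> omega
      · have hys : ∃ z ∈ ys, q z = true := by
          rcases h with ⟨z, hz, hq⟩
          rcases List.mem_cons.mp hz with rfl | hz'
          · exact absurd hq hy
          · exact ⟨z, hz', hq⟩
        simp only [hy, if_neg, Bool.not_eq_true]
        have := ih (k + 1) a hys
        push_cast at this ⊢; constructor <;> omega

theorem pvFloordiv_two_ge (m : Int) : (10 ≤ PySem.Int.floordiv m 2) ↔ 20 ≤ m := by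
  rw [PySem.Int.floordiv_eq_ediv_of_pos (by omega)]
  omega

-- ===== VERDICT (by name: the statement is the Claim_ definition above) =====
theorem is_appropriate_followup_time_spec : Claim_equal_is_appropriate_followup_time := by
  intro topic messages _
  unfold Spec_is_appropriate_followup_time is_appropriate_followup_time is_appropriate_followup_time_alt
  by_cases ht : topic = ""
  · simp [ht]
  simp only [ht, if_false]
  set tl := PySem.Str.lower topic with htl
  set q := pvMsgMatches tl with hq
  set n := messages.length with hn
  set cutN : Nat := n - 19 with hcut
  have hnn : PySem.List.len messages = ((n : Nat) : Int) := by rw [hn]; rfl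
  have hcutInt : max (PySem.List.len messages - 19) 0 = ((cutN : Nat) : Int) := by
    rw [hnn]; omega
  have hsliceR : PySem.List.slice messages (some ((cutN : Nat) : Int)) none
      = messages.drop cutN := PySem.List.slice_from_natCast messages cutN
  have hsliceL : PySem.List.slice messages none (some ((cutN : Nat) : Int))
      = messages.take cutN := PySem.List.slice_to_natCast messages cutN
  rw [pvLoopA_eq_foldl, hcutInt, hsliceR, hsliceL]
  have hsplit : PySem.List.enumerate messages 0
      = PySem.List.enumerate (messages.take cutN) 0
        ++ PySem.List.enumerate (messages.drop cutN) (0 + ((messages.take cutN).length : Int)) := by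
    rw [← PySem.List.enumerate_append, List.take_append_drop]
  rw [hsplit, List.foldl_append]
  set old := messages.take cutN with hold
  set recent := messages.drop cutN with hrec
  have hlen_take : old.length = cutN := by rw [hold]; simp [← hn]; omega
  have hlen_drop : recent.length = n - cutN := by rw [hrec]; simp [← hn]
  set F0 := (PySem.List.enumerate old 0).foldl
      (fun acc p => if q p.2 then p.1 else acc) (-1) with hF0
  set F1 := (PySem.List.enumerate recent (0 + (old.length : Int))).foldl
      (fun acc p => if q p.2 then p.1 else acc) F0 with hF1
  by_cases hR : ∃ y ∈ recent, q y = true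
  · -- a recent mention: A's last index is within the final window → both false
    have hb := pvFold_yes q recent (0 + (old.length : Int)) F0 hR
    rw [← hF1, hlen_take] at hb
    have h1 : ¬ (F1 = -1) := by omega
    have hBany : recent.any q = true := by
      rcases hR with ⟨y, hy, hqy⟩; exact List.any_eq_true.mpr ⟨y, hy, hqy⟩
    have hA : decide (PySem.Int.floordiv (PySem.List.len messages - F1) 2 ≥ 10) = false := by
      rw [decide_eq_false_iff_not, ge_iff_le, pvFloordiv_two_ge, hnn]; omega
    rw [if_neg h1, hA, hBany]
    simp
  · -- no recent mention: the recent pass leaves the accumulator unchanged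
    have hpass : F1 = F0 := by
      rw [hF1]
      exact pvFold_no q recent _ F0 (by push_neg at hR; intro y hy; exact hR y hy)
    have hBnoR : recent.any q = false := by
      rw [List.any_eq_false]; push_neg at hR; intro y hy; exact hR y hy
    by_cases hO : ∃ y ∈ old, q y = true
    · -- an old mention: A's index lies before the window → both true
      have hb := pvFold_yes q old 0 (-1) hO
      rw [← hF0, hlen_take] at hb
      have hcutpos : 1 ≤ cutN := by
        by_contra hc
        have hc0 : cutN = 0 := by omega
        have hnil : old = [] := by rw [hold, hc0]; rfl
        rcases hO with ⟨y, hy, _⟩; rw [hnil] at hy; simp at hy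
      have h1 : ¬ (F1 = -1) := by omega
      have hOany : old.any q = true := by
        rcases hO with ⟨y, hy, hqy⟩; exact List.any_eq_true.mpr ⟨y, hy, hqy⟩
      have hA : decide (PySem.Int.floordiv (PySem.List.len messages - F1) 2 ≥ 10) = true := by
        rw [decide_eq_true_iff, ge_iff_le, pvFloordiv_two_ge, hnn, hpass]; omega
      rw [if_neg h1, hA, hBnoR, hOany]
      simp
    · -- no mention at all → both false
      have hF0v : F0 = -1 := pvFold_no q old 0 (-1) (by push_neg at hO; exact hO)
      have hOany : old.any q = false := by
        rw [List.any_eq_false]; push_neg at hO; exact hO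
      rw [hpass, if_pos hF0v, hBnoR, hOany]
      simp
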